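-- pv_equiv track=rewrite | github.com/saidniyr1943/CTI-110 | mock_test2_11_questions_answer_key.py | sortedAndUniqueLetters
-- ===== SOURCE A (Python) =====
-- def sortedAndUniqueLetters(s):
--     """Returns True if letters are unique and alphabetically sorted."""
--
--     letters = ""
--
--     for ch in s:
--         if ch.isalpha():
--             letters += ch.lower()
--
--     for i in range(len(letters)):
--         for j in range(i + 1, len(letters)):
--             if letters[i] == letters[j]:
--                 return False
--
--     for i in range(len(letters) - 1):
--         if letters[i] > letters[i + 1]:
--             return False
--
--     return True
-- ===== SOURCE B (Python) =====
-- def sortedAndUniqueLetters(s):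
--     """Returns True if letters are unique and alphabetically sorted."""
--     letters = [ch.lower() for ch in s if ch.isalpha()]
--     return all(a < b for a, b in zip(letters, letters[1:]))
-- ===== Notes on version B (the rewrite author's own statement) =====
-- stated objective: alternative
-- what changed: Replaces A's all-pairs duplicate scan plus a separate adjacent non-decreasing scan with one linear pass checking the filtered lowercased letters are strictly increasing (strictly increasing = unique + sorted); worst-case cost drops from O(n^2) to O(n), but A's early return makes typical inputs comparable, so no speed is claimed.
import Mathlib
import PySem

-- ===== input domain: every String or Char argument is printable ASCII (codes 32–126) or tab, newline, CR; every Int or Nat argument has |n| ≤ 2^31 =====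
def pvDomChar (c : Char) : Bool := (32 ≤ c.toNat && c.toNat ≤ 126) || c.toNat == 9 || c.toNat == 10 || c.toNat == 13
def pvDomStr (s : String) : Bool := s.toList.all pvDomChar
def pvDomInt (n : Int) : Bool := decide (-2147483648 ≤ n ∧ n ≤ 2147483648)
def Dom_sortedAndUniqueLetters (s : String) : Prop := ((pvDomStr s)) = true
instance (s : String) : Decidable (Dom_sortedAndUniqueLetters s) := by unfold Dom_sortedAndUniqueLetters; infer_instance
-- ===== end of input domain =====

-- B replaces A's all-pairs duplicate scan + adjacent non-decreasing scan with a single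
-- strictly-increasing pass over the filtered lowercased letters (alternative algorithm).


-- ===== PORT A =====
-- inner loop 'for j in range(i+1, len(letters)): if letters[i] == letters[j]: return False'
def pvDupInner (l : List Char) (i j : Nat) : Bool :=
  if j < l.length then
    (if l.getD i ' ' == l.getD j ' ' then true else pvDupInner l i (j + 1))
  else false
termination_by l.length - j

-- outer loop 'for i in range(len(letters)): …'
def pvDupOuter (l : List Char) (i : Nat) : Bool :=
  if i < l.length then
    (if pvDupInner l i (i + 1) then true else pvDupOuter l (i + 1))
  else false
termination_by l.length - i

-- 'for i in range(len(letters)-1): if letters[i] > letters[i+1]: return False'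
def pvAdjScan (l : List Char) (i : Nat) : Bool :=
  if i + 1 < l.length then
    (if l.getD (i + 1) ' ' < l.getD i ' ' then true else pvAdjScan l (i + 1))
  else false
termination_by l.length - i

def sortedAndUniqueLetters (s : String) : Bool :=
  let letters := s.toList.foldl
    (fun acc ch => if PySem.Chars.isalpha ch then acc ++ [PySem.Chars.lowerChar ch] else acc) []
  if pvDupOuter letters 0 then false
  else if pvAdjScan letters 0 then false
  else true

-- ===== PORT B =====
-- 'all(a < b for a, b in zip(letters, letters[1:]))'
def pvAllIncr : List Char → Bool
  | [] => true
  | [_] => true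
  | a :: b :: rest => decide (a < b) && pvAllIncr (b :: rest)

def sortedAndUniqueLetters_alt (s : String) : Bool :=
  pvAllIncr ((s.toList.filter PySem.Chars.isalpha).map PySem.Chars.lowerChar)

-- ===== PRECONDITION & SPEC =====
def Spec_sortedAndUniqueLetters (s : String) (out : Bool) : Prop := out = sortedAndUniqueLetters_alt s
instance (s : String) (out : Bool) : Decidable (Spec_sortedAndUniqueLetters s out) := by unfold Spec_sortedAndUniqueLetters; infer_instance

-- ===== CLAIM (what is proved, stated in full; the proofs are below) =====
def Claim_equal_sortedAndUniqueLetters : Prop := ∀ (s : String), Dom_sortedAndUniqueLetters s → Spec_sortedAndUniqueLetters s (sortedAndUniqueLetters s)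

-- ===== LEMMAS AND PROOFS =====

theorem pvAllIncr_iff (l : List Char) : pvAllIncr l = true ↔ List.IsChain (· < ·) l := by
  induction l with
  | nil => simp [pvAllIncr, List.IsChain]
  | cons a t ih =>
    cases t with
    | nil => simp [pvAllIncr, List.IsChain]
    | cons b r =>
      simp only [pvAllIncr, Bool.and_eq_true, decide_eq_true_eq, List.isChain_cons_cons] at ih ⊢
      tauto

theorem pvDupInner_false_iff (l : List Char) (i j : Nat) :
    pvDupInner l i j = false ↔ ∀ k, j ≤ k → k < l.length → l.getD i ' ' ≠ l.getD k ' ' := by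
  induction' h : l.length - j using Nat.strong_induction_on with n ih generalizing j
  rw [pvDupInner]
  split_ifs with h1 h2
  · simp only [Bool.true_eq_false, false_iff]
    push_neg
    exact ⟨j, le_refl j, h1, by simpa using h2⟩
  · rw [ih (l.length - (j+1)) (by omega) (j+1) rfl]
    constructor
    · intro hall k hk hkl
      rcases Nat.eq_or_lt_of_le hk with rfl | hlt
      · simpa using h2
      · exact hall k hlt hkl
    · intro hall k hk hkl; exact hall k (by omega) hkl
  · simp only [false_iff] at *
    constructor
    · intro _ k hk hkl; omega
    · simp

theorem pvDupOuter_false_iff (l : List Char) (i : Nat) :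
    pvDupOuter l i = false ↔ ∀ p q, i ≤ p → p < q → q < l.length → l.getD p ' ' ≠ l.getD q ' ' := by
  induction' h : l.length - i using Nat.strong_induction_on with n ih generalizing i
  rw [pvDupOuter]
  split_ifs with h1 h2
  · simp only [Bool.true_eq_false, false_iff]
    push_neg
    have h2' : ¬ pvDupInner l i (i + 1) = false := by simp [h2]
    rw [pvDupInner_false_iff] at h2'
    push_neg at h2'
    obtain ⟨k, hk1, hk2, hk3⟩ := h2'
    exact ⟨i, k, le_refl i, by omega, hk2, hk3⟩
  · rw [ih (l.length - (i+1)) (by omega) (i+1) rfl]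
    constructor
    · intro hall p q hp hpq hql
      rcases Nat.eq_or_lt_of_le hp with rfl | hlt
      · rw [Bool.not_eq_true, pvDupInner_false_iff] at h2
        exact h2 q (by omega) hql
      · exact hall p q hlt hpq hql
    · intro hall p q hp hpq hql; exact hall p q (by omega) hpq hql
  · simp only [true_iff]
    intro p q hp hpq hql; omega

theorem pvAdjScan_false_iff (l : List Char) (i : Nat) :
    pvAdjScan l i = false ↔ ∀ k, i ≤ k → k + 1 < l.length → ¬ l.getD (k + 1) ' ' < l.getD k ' ' := by
  induction' h : l.length - i using Nat.strong_induction_on with n ih generalizing i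
  rw [pvAdjScan]
  split_ifs with h1 h2
  · simp only [Bool.true_eq_false, false_iff]
    push_neg
    exact ⟨i, le_refl i, h1, h2⟩
  · rw [ih (l.length - (i+1)) (by omega) (i+1) rfl]
    constructor
    · intro hall k hk hkl
      rcases Nat.eq_or_lt_of_le hk with rfl | hlt
      · exact h2
      · exact hall k hlt hkl
    · intro hall k hk hkl; exact hall k (by omega) hkl
  · simp only [true_iff]
    intro k hk hkl; omega

theorem pvKey (l : List Char) :
    (if pvDupOuter l 0 then false else if pvAdjScan l 0 then false else true) = pvAllIncr l := by
  by_cases hd : pvDupOuter l 0 = true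
  · simp only [hd, if_true]
    have hd' : ¬ pvDupOuter l 0 = false := by simp [hd]
    rw [pvDupOuter_false_iff] at hd'
    push_neg at hd'
    obtain ⟨p, q, _, hpq, hql, heq⟩ := hd'
    symm
    rw [Bool.eq_false_iff]
    intro hi
    rw [pvAllIncr_iff, List.isChain_iff_pairwise, List.pairwise_iff_getElem] at hi
    have := hi p q (by omega) hql hpq
    rw [List.getD_eq_getElem l ' ' (by omega), List.getD_eq_getElem l ' ' hql] at heq
    exact absurd heq (ne_of_lt this)
  · rw [Bool.not_eq_true] at hd
    simp only [hd, Bool.false_eq_true, if_false]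
    by_cases ha : pvAdjScan l 0 = true
    · simp only [ha, if_true]
      have ha' : ¬ pvAdjScan l 0 = false := by simp [ha]
      rw [pvAdjScan_false_iff] at ha'
      push_neg at ha'
      obtain ⟨k, _, hkl, hgt⟩ := ha'
      symm
      rw [Bool.eq_false_iff]
      intro hi
      rw [pvAllIncr_iff, List.isChain_iff_pairwise, List.pairwise_iff_getElem] at hi
      have := hi k (k + 1) (by omega) hkl (by omega)
      rw [List.getD_eq_getElem l ' ' hkl, List.getD_eq_getElem l ' ' (show k < l.length by omega)] at hgt
      exact absurd this (not_lt_of_gt hgt)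
    · rw [Bool.not_eq_true] at ha
      simp only [ha, Bool.false_eq_true, if_false]
      symm
      rw [pvAllIncr_iff, List.isChain_iff_getElem]
      intro k hkl
      rw [pvAdjScan_false_iff] at ha
      rw [pvDupOuter_false_iff] at hd
      have h1 := ha k (Nat.zero_le k) hkl
      have h2 := hd k (k + 1) (Nat.zero_le k) (by omega) hkl
      rw [List.getD_eq_getElem l ' ' hkl, List.getD_eq_getElem l ' ' (show k < l.length by omega)] at h1 h2
      exact lt_of_le_of_ne (not_lt.mp h1) h2

-- ===== VERDICT (by name: the statement is the Claim_ definition above) =====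
theorem sortedAndUniqueLetters_spec : Claim_equal_sortedAndUniqueLetters := by
  intro s _
  unfold Spec_sortedAndUniqueLetters sortedAndUniqueLetters sortedAndUniqueLetters_alt
  rw [PySem.List.foldl_append_if]
  simpa using pvKey ((s.toList.filter PySem.Chars.isalpha).map PySem.Chars.lowerChar)
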